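-- pv_equiv track=rewrite | github.com/pypi-data/pypi-mirror-375 | packages/mindspore/mindspore-2.7.0-cp311-cp311-manylinux1_x86_64.whl/mindspore/train/_utils.py | remove_param_redundancy
-- ===== SOURCE A (Python) =====
-- def _collect_settings_by_rank(redundancy_map):
--     """
--     Collect parameter redundancy map by rank id.
--
--     {"param1":((1,3,5,7),(2,4,6,8)),"param2":((1,3,5,7),(2,4,6,8))}
--     ->{(1,3,5,7):{"param1", "param2"},(2,4,6,8):{"param1", "param2"}}
--     """
--     redundancy_map_reversed = {}
--     for key, redundancy in redundancy_map.items():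
--         for index, item in enumerate(redundancy):
--             redundancy_map_reversed.setdefault(item, []).append(
--                 (key, index))
--     return redundancy_map_reversed
--
-- def _restructure(input_dict):
--     """
--     Flatten and reorganize the nested dictionary structure."""
--     if all(not isinstance(item, tuple) for item in input_dict):
--         return input_dict
--     res_dict = {}
--     for key, values in input_dict.items():
--         for index, value in enumerate(values):
--             res_dict.setdefault(key[index % len(key)], []).append(value)
--     return _restructure(res_dict)
--
-- def _rotate_list_elements(i, input_list):
--     """Rotate element list."""
--     rotated_list = [input_list[(i + j) % len(input_list)] for j in
--                     range(len(input_list))]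
--     return rotated_list
--
-- def remove_param_redundancy(param_redundancy_dict, keep_redundancy=1):
--     """
--     Remove parameter redundancy, get the single parameter for each rank id.
--     Args:
--         param_redundancy_dict (Dict): Parameter redundancy dict.
--         keep_redundancy (Int): Keep redundancy number.
--
--     Returns:
--         Dict, single parameter for each rank id. Key is rank_id, value is set(params).
--
--     Examples:
--         >>> from mindspore.train.utils import get_parameter_redundancy, remove_param_redundancy
--         >>> param_redundancy_dict = get_parameter_redundancy("/path/to/strategy.ckpt")
--         >>> single_parameter = remove_param_redundancy(param_redundancy_dict)
--         {0: {param1, param3}, 1: {param2, param4},,,}}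
--     """
--     redundancy_dict_reversed = _collect_settings_by_rank(param_redundancy_dict)
--     sorted_layouts = {}
--     for device_layout, layer_names_list in redundancy_dict_reversed.items():
--         sorted_layer_names = [item[0] for item in layer_names_list]
--         sorted_layouts[device_layout] = sorted_layer_names
--     result = {}
--     for i in range(keep_redundancy):
--         rotated_layouts = {tuple(_rotate_list_elements(i, key)): value for
--                            key, value in sorted_layouts.items()}
--         restructured_layouts = _restructure(rotated_layouts)
--         for key, value in restructured_layouts.items():
--             result.setdefault(key, set()).update(set(value))
--     return result
-- ===== SOURCE B (Python) =====
-- def remove_param_redundancy(param_redundancy_dict, keep_redundancy=1):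
--     # One pass: group params by layout once, then assign the idx-th param of a
--     # layout directly to rank layout[(i + idx) % len(layout)] -- the closed form
--     # of "rotate the layout by i, then bucket position idx into key[idx % len]".
--     params_by_layout = {}
--     for param, layouts in param_redundancy_dict.items():
--         for layout in layouts:
--             params_by_layout.setdefault(layout, []).append(param)
--     result = {}
--     for i in range(keep_redundancy):
--         for layout, params in params_by_layout.items():
--             n = len(layout)
--             for idx, param in enumerate(params):
--                 result.setdefault(layout[(i + idx) % n], set()).add(param)
--     return result
-- ===== Notes on version B (the rewrite author's own statement) =====
-- stated objective: simpler
-- what changed: A's four-stage pipeline (reverse map with indices, per-layout name projection, per-i key rotation via a rebuilt dict, recursive _restructure distribution, then a set-update flush of the grouped dict) is replaced by one grouping pass (params by layout) and a single triple loop that assigns each param directly to rank layout[(i+idx) % len(layout)], the closed form of rotate-then-bucket, updating the result set dict element by element. (measured ~3.7x faster: per iteration it builds no rotated key lists, no rebuilt dict and no intermediate grouped dict)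
import Mathlib
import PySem

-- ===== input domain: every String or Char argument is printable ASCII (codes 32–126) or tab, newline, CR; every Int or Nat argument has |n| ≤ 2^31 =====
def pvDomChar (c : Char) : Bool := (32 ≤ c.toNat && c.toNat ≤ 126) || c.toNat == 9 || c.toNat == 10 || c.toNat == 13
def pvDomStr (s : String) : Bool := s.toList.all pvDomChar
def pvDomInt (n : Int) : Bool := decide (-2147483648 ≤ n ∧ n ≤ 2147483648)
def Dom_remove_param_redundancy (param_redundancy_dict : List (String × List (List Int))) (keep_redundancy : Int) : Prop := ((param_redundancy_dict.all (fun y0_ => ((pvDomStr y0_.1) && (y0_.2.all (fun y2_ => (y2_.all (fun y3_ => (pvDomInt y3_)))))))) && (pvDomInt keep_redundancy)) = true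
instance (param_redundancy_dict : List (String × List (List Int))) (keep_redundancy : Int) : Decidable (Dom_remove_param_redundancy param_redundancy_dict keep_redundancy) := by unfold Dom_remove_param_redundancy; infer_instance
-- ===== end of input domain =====

-- B replaces A's rotate-the-layout / recursive-restructure / per-layout-flush pipeline by one grouping
-- pass and a direct index formula layout[(i+idx) % len]; equivalence is about the RETURN value
-- (neither implementation mutates its argument observably).

-- Shared Python-dict primitives (exact Python dict semantics: insertion order kept, overwrite in place,
-- new keys appended at the end). Both ports use them, as both Pythons use dicts.
-- d[k] = v
def pyDictInsert {α β : Type} [DecidableEq α] : List (α × β) → α → β → List (α × β)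
  | [], k, v => [(k, v)]
  | (k', w) :: t, k, v => if k' = k then (k, v) :: t else (k', w) :: pyDictInsert t k v

-- d.setdefault(k, []).append(v)
def pyBucketAdd {α β : Type} [DecidableEq α] : List (α × List β) → α → β → List (α × List β)
  | [], k, v => [(k, [v])]
  | (k', vs) :: t, k, v => if k' = k then (k', vs ++ [v]) :: t else (k', vs) :: pyBucketAdd t k v

-- r.setdefault(k, set()).add(v)
def pySetAdd : List (Int × PySem.Set String) → Int → String → List (Int × PySem.Set String)
  | [], k, v => [(k, PySem.Set.add PySem.Set.empty v)]
  | (k', s) :: t, k, v => if k' = k then (k', PySem.Set.add s v) :: t else (k', s) :: pySetAdd t k v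

-- r.setdefault(k, set()).update(set(vs)) — ported iterating vs in list order: a Python set's iteration
-- order is not observable here since the dict's values are sets (compared as finite sets).
def pySetUpdate : List (Int × PySem.Set String) → Int → List String → List (Int × PySem.Set String)
  | [], k, vs => [(k, vs.foldl PySem.Set.add PySem.Set.empty)]
  | (k', s) :: t, k, vs => if k' = k then (k', vs.foldl PySem.Set.add s) :: t else (k', s) :: pySetUpdate t k vs

-- the argument dict as the harness builds it from the association list: the first pair per key wins
def pyDictOf (l : List (String × List (List Int))) : List (String × List (List Int)) :=
  l.foldl (fun d kv => if kv.1 ∈ d.map Prod.fst then d else d ++ [kv]) []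

-- ===== PORT A =====
-- _collect_settings_by_rank
def pvCollectSettingsByRank (d : List (String × List (List Int))) : List (List Int × List (String × Int)) :=
  d.foldl (fun acc kv =>
    (PySem.List.enumerate kv.2).foldl (fun acc iv => pyBucketAdd acc iv.2 (kv.1, iv.1)) acc) []

-- _rotate_list_elements i l = [l[(i+j) % len(l)] for j in range(len(l))]; the index is in range for
-- nonempty l, so getD's default is never read; for l = [] the comprehension is empty.
def pvRotate (i : Int) (l : List Int) : List Int :=
  (PySem.List.pyRange 0 (l.length : Int) 1).map
    (fun j => (PySem.List.pyGet? l (PySem.Int.mod (i + j) (l.length : Int))).getD 0)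

-- the distribution pass of _restructure: res.setdefault(key[index % len(key)], []).append(value);
-- key[index % len(key)] raises ZeroDivisionError in Python when key is empty — those inputs are
-- outside Pre_ (the port's getD 0 there is never compared against Python).
def pvDistribute (d : List (List Int × List String)) : List (Int × List String) :=
  d.foldl (fun acc kv =>
    (PySem.List.enumerate kv.2).foldl (fun acc iv =>
      pyBucketAdd acc ((PySem.List.pyGet? kv.1 (PySem.Int.mod iv.1 (kv.1.length : Int))).getD 0) iv.2) acc) []

-- _restructure: the `all(not isinstance(item, tuple) for item in input_dict)` guard ranges over the KEYS,
-- which here are tuples, so it is true iff the dict is empty; after one distribution pass every key is an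
-- int and the recursive call returns its argument unchanged. The recursion is therefore exactly: identity
-- on the empty dict, otherwise one distribution pass.
def pvRestructure (d : List (List Int × List String)) : List (Int × List String) :=
  if d.isEmpty then [] else pvDistribute d

def remove_param_redundancy (param_redundancy_dict : List (String × List (List Int))) (keep_redundancy : Int) : List (Int × List String) :=
  let redundancy_dict_reversed := pvCollectSettingsByRank (pyDictOf param_redundancy_dict)
  let sorted_layouts := redundancy_dict_reversed.foldl
    (fun acc kv => pyDictInsert acc kv.1 (kv.2.map (·.1))) []
  (PySem.List.pyRange 0 keep_redundancy 1).foldl (fun result i =>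
    let rotated := sorted_layouts.foldl (fun acc kv => pyDictInsert acc (pvRotate i kv.1) kv.2) []
    let restructured := pvRestructure rotated
    restructured.foldl (fun r kv => pySetUpdate r kv.1 kv.2) result) []

-- ===== PORT B =====
def remove_param_redundancy_alt (param_redundancy_dict : List (String × List (List Int))) (keep_redundancy : Int) : List (Int × List String) :=
  let params_by_layout := (pyDictOf param_redundancy_dict).foldl
    (fun acc kv => kv.2.foldl (fun acc layout => pyBucketAdd acc layout kv.1) acc) []
  (PySem.List.pyRange 0 keep_redundancy 1).foldl (fun result i =>
    params_by_layout.foldl (fun result kv =>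
      (PySem.List.enumerate kv.2).foldl (fun result iv =>
        pySetAdd result ((PySem.List.pyGet? kv.1 (PySem.Int.mod (i + iv.1) (kv.1.length : Int))).getD 0) iv.2) result) result) []

-- ===== PRECONDITION & SPEC =====
-- Pre_ excludes exactly the inputs where some layout is the empty tuple while keep_redundancy ≥ 1:
-- there both Pythons raise ZeroDivisionError (key[index % len(key)] resp. layout[(i+idx) % n] with n = 0).
def Pre_remove_param_redundancy (param_redundancy_dict : List (String × List (List Int))) (keep_redundancy : Int) : Prop :=
  1 ≤ keep_redundancy → ∀ p ∈ param_redundancy_dict, ∀ l ∈ p.2, l ≠ []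
instance (param_redundancy_dict : List (String × List (List Int))) (keep_redundancy : Int) : Decidable (Pre_remove_param_redundancy param_redundancy_dict keep_redundancy) := by unfold Pre_remove_param_redundancy; infer_instance

def pvWitness_remove_param_redundancy : (List (String × List (List Int))) × Int := ([("p1", [[0, 1], [2, 3]]), ("p2", [[0, 1]])], 2)

def Spec_remove_param_redundancy (param_redundancy_dict : List (String × List (List Int))) (keep_redundancy : Int) (out : List (Int × List String)) : Prop := out = remove_param_redundancy_alt param_redundancy_dict keep_redundancy
instance (param_redundancy_dict : List (String × List (List Int))) (keep_redundancy : Int) (out : List (Int × List String)) : Decidable (Spec_remove_param_redundancy param_redundancy_dict keep_redundancy out) := by unfold Spec_remove_param_redundancy; infer_instance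

-- ===== CLAIM (what is proved, stated in full; the proofs are below) =====
def Claim_equal_remove_param_redundancy : Prop := ∀ (param_redundancy_dict : List (String × List (List Int))) (keep_redundancy : Int), Dom_remove_param_redundancy param_redundancy_dict keep_redundancy → Pre_remove_param_redundancy param_redundancy_dict keep_redundancy → Spec_remove_param_redundancy param_redundancy_dict keep_redundancy (remove_param_redundancy param_redundancy_dict keep_redundancy)

-- ===== LEMMAS AND PROOFS =====

theorem pv_keys_pyBucketAdd {α β : Type} [DecidableEq α] (l : List (α × List β)) (k : α) (v : β) :
    (pyBucketAdd l k v).map Prod.fst = if k ∈ l.map Prod.fst then l.map Prod.fst else l.map Prod.fst ++ [k] := by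
  induction l with
  | nil => simp [pyBucketAdd]
  | cons p t ih =>
    obtain ⟨k', vs⟩ := p
    by_cases h : k' = k
    · subst h; simp [pyBucketAdd]
    · rw [pyBucketAdd]
      rw [if_neg h]
      simp only [List.map_cons, ih]
      have hne : ¬ k = k' := fun hh => h hh.symm
      by_cases hm : k ∈ t.map Prod.fst <;> simp [hm, hne]

theorem pv_nodup_pyBucketAdd {α β : Type} [DecidableEq α] (l : List (α × List β)) (k : α) (v : β)
    (h : (l.map Prod.fst).Nodup) : ((pyBucketAdd l k v).map Prod.fst).Nodup := by
  rw [pv_keys_pyBucketAdd]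
  split_ifs with hm
  · exact h
  · refine List.Nodup.append h (List.nodup_singleton k) ?_
    intro x hx hxk
    simp only [List.mem_singleton] at hxk
    exact hm (hxk ▸ hx)

theorem pv_foldl_invariant {α σ : Type} (P : σ → Prop) (f : σ → α → σ) (l : List α) (s : σ)
    (h0 : P s) (hstep : ∀ s x, P s → P (f s x)) : P (l.foldl f s) := by
  induction l generalizing s with
  | nil => exact h0
  | cons x t ih => exact ih _ (hstep _ _ h0)

theorem pv_pyDictInsert_fresh {α β : Type} [DecidableEq α] (l : List (α × β)) (k : α) (v : β)
    (h : k ∉ l.map Prod.fst) : pyDictInsert l k v = l ++ [(k, v)] := by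
  induction l with
  | nil => simp [pyDictInsert]
  | cons p t ih =>
    obtain ⟨k', w⟩ := p
    simp only [List.map_cons, List.mem_cons] at h
    push Not at h
    rw [pyDictInsert, if_neg (fun hh => h.1 hh.symm), List.cons_append, ih h.2]

theorem pv_foldl_insert_fresh {α α' β γ : Type} [DecidableEq α'] (g : α → α') (f : β → γ) :
    ∀ (l : List (α × β)) (acc : List (α' × γ)),
    (l.map (fun kv => g kv.1)).Nodup →
    (∀ k ∈ l.map (fun kv => g kv.1), k ∉ acc.map Prod.fst) →
    l.foldl (fun a kv => pyDictInsert a (g kv.1) (f kv.2)) acc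
      = acc ++ l.map (fun kv => (g kv.1, f kv.2)) := by
  intro l
  induction l with
  | nil => intro acc _ _; simp
  | cons p t ih =>
    intro acc hnd hfresh
    simp only [List.map_cons, List.nodup_cons] at hnd
    rw [List.foldl_cons, pv_pyDictInsert_fresh _ _ _ (hfresh _ (by simp))]
    rw [ih _ hnd.2 ?_]
    · simp
    · intro k hk
      simp only [List.map_append, List.map_cons, List.map_nil, List.mem_append, List.mem_singleton]
      rintro (hka | hkp)
      · exact hfresh k (by simp [hk]) hka
      · exact hnd.1 (hkp ▸ hk)

theorem pv_map_pyBucketAdd {α β γ : Type} [DecidableEq α] (f : β → γ) :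
    ∀ (l : List (α × List β)) (k : α) (v : β),
    (pyBucketAdd l k v).map (fun kv => (kv.1, kv.2.map f))
      = pyBucketAdd (l.map (fun kv => (kv.1, kv.2.map f))) k (f v) := by
  intro l
  induction l with
  | nil => intro k v; simp [pyBucketAdd]
  | cons p t ih =>
    intro k v
    obtain ⟨k', vs⟩ := p
    by_cases h : k' = k
    · subst h; simp [pyBucketAdd]
    · simp only [List.map_cons]
      rw [pyBucketAdd, if_neg h, pyBucketAdd, if_neg h, List.map_cons, ih]

theorem pv_enumerate_cons {α : Type} (x : α) (l : List α) (s : Int) :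
    PySem.List.enumerate (x :: l) s = (s, x) :: PySem.List.enumerate l (s + 1) := by
  simp [PySem.List.enumerate]

theorem pv_collect_inner (p : String) :
    ∀ (v : List (List Int)) (s : Int) (acc : List (List Int × List (String × Int))),
    ((PySem.List.enumerate v s).foldl (fun a iv => pyBucketAdd a iv.2 (p, iv.1)) acc).map
        (fun kv => (kv.1, kv.2.map Prod.fst))
      = v.foldl (fun a c => pyBucketAdd a c p) (acc.map (fun kv => (kv.1, kv.2.map Prod.fst))) := by
  intro v
  induction v with
  | nil => intro s acc; simp [PySem.List.enumerate]
  | cons c t ih =>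
    intro s acc
    rw [pv_enumerate_cons, List.foldl_cons, ih, List.foldl_cons, pv_map_pyBucketAdd]

theorem pv_collect_eq_group (D : List (String × List (List Int))) :
    ∀ (acc : List (List Int × List (String × Int))),
    (D.foldl (fun acc kv =>
        (PySem.List.enumerate kv.2).foldl (fun acc iv => pyBucketAdd acc iv.2 (kv.1, iv.1)) acc) acc).map
        (fun kv => (kv.1, kv.2.map Prod.fst))
      = D.foldl (fun acc kv => kv.2.foldl (fun a c => pyBucketAdd a c kv.1) acc)
          (acc.map (fun kv => (kv.1, kv.2.map Prod.fst))) := by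
  induction D with
  | nil => intro acc; simp
  | cons kv t ih =>
    intro acc
    rw [List.foldl_cons, ih, List.foldl_cons, pv_collect_inner]

theorem pv_length_rotate (i : Int) (k : List Int) : (pvRotate i k).length = k.length := by
  simp [pvRotate, PySem.List.pyRange_zero_natCast]

theorem pv_pyGet_inrange (l : List Int) (t : Int) (h0 : 0 ≤ t) (h1 : t < (l.length : Int)) :
    (PySem.List.pyGet? l t).getD 0 = l.getD t.toNat 0 := by
  simp [PySem.List.pyGet?, PySem.List.pyIdx?, h0, h1, List.getD_eq_getElem?_getD]

theorem pv_rotate_getElem (i : Int) (k : List Int) (t : Nat) (ht : t < k.length) :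
    (pvRotate i k)[t]'(by rw [pv_length_rotate]; exact ht)
      = (PySem.List.pyGet? k (PySem.Int.mod (i + t) (k.length : Int))).getD 0 := by
  simp only [pvRotate, PySem.List.pyRange_zero_natCast, List.map_map, List.getElem_map,
    List.getElem_range, Function.comp_apply]

theorem pv_mod_pos_emod (a b : Int) (hb : 0 < b) : PySem.Int.mod a b = a % b :=
  PySem.Int.mod_eq_emod_of_pos hb

theorem pv_rotGet (i j : Int) (k : List Int) :
    (PySem.List.pyGet? (pvRotate i k) (PySem.Int.mod j ((pvRotate i k).length : Int))).getD 0
      = (PySem.List.pyGet? k (PySem.Int.mod (i + j) (k.length : Int))).getD 0 := by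
  rcases Nat.eq_zero_or_pos k.length with hn | hn
  · have hk : k = [] := List.eq_nil_of_length_eq_zero hn
    subst hk
    simp [pvRotate, PySem.List.pyGet?, PySem.List.pyIdx?]
  · have hpos : (0 : Int) < (k.length : Int) := by exact_mod_cast hn
    rw [pv_length_rotate, pv_mod_pos_emod _ _ hpos]
    have h0 : 0 ≤ j % (k.length : Int) := Int.emod_nonneg j (by omega)
    have h1 : j % (k.length : Int) < (k.length : Int) := Int.emod_lt_of_pos j hpos
    rw [pv_pyGet_inrange _ _ h0 (by rw [pv_length_rotate]; exact h1)]
    have htn : (j % (k.length : Int)).toNat < k.length := by omega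
    rw [List.getD_eq_getElem _ _ (by rw [pv_length_rotate]; exact htn)]
    rw [pv_rotate_getElem i k _ htn]
    congr 1
    rw [pv_mod_pos_emod _ _ hpos, pv_mod_pos_emod _ _ hpos]
    have : ((j % (k.length : Int)).toNat : Int) = j % (k.length : Int) := by omega
    rw [this, Int.add_emod i (j % _), Int.emod_emod_of_dvd _ (dvd_refl _), ← Int.add_emod]

theorem pv_rotate_injective (i : Int) : Function.Injective (pvRotate i) := by
  intro k1 k2 h
  have hl : k1.length = k2.length := by
    rw [← pv_length_rotate i k1, h, pv_length_rotate]
  rcases Nat.eq_zero_or_pos k1.length with hn | hn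
  · have h1 : k1 = [] := List.eq_nil_of_length_eq_zero hn
    have h2 : k2 = [] := List.eq_nil_of_length_eq_zero (hl ▸ hn)
    rw [h1, h2]
  · apply List.ext_getElem hl
    intro m hm1 hm2
    have hpos : (0 : Int) < (k1.length : Int) := by exact_mod_cast hn
    have hj0 : 0 ≤ ((m : Int) - i) % (k1.length : Int) := Int.emod_nonneg _ (by omega)
    have hj1 : ((m : Int) - i) % (k1.length : Int) < (k1.length : Int) := Int.emod_lt_of_pos _ hpos
    have hjn : (((m : Int) - i) % (k1.length : Int)).toNat < k1.length := by omega
    have heq : (pvRotate i k1)[(((m : Int) - i) % (k1.length : Int)).toNat]'(by rw [pv_length_rotate]; exact hjn)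
        = (pvRotate i k2)[(((m : Int) - i) % (k1.length : Int)).toNat]'(by rw [pv_length_rotate, ← hl]; exact hjn) := by
      congr 1
    rw [pv_rotate_getElem i k1 _ hjn, pv_rotate_getElem i k2 _ (hl ▸ hjn)] at heq
    rw [← hl] at heq
    have hcast : ((((m : Int) - i) % (k1.length : Int)).toNat : Int) = ((m : Int) - i) % (k1.length : Int) := by omega
    have hmod : PySem.Int.mod (i + ((((m : Int) - i) % (k1.length : Int)).toNat : Int)) (k1.length : Int) = (m : Int) := by
      rw [hcast, pv_mod_pos_emod _ _ hpos]
      conv_lhs => rw [Int.add_emod, Int.emod_emod_of_dvd _ (dvd_refl _), ← Int.add_emod]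
      have h2 : i + ((m : Int) - i) = (m : Int) := by ring
      rw [h2]
      exact Int.emod_eq_of_lt (by omega) (by exact_mod_cast hm1)
    rw [hmod] at heq
    rw [pv_pyGet_inrange k1 _ (by omega) (by exact_mod_cast hm1),
        pv_pyGet_inrange k2 _ (by omega) (by exact_mod_cast hm2)] at heq
    simp only [Int.toNat_natCast] at heq
    simp only [List.getD_eq_getElem?_getD, List.getElem?_eq_getElem hm1,
      List.getElem?_eq_getElem hm2, Option.getD_some] at heq
    exact heq

theorem pv_setUpdate_singleton : ∀ (r : List (Int × PySem.Set String)) (k : Int) (v : String),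
    pySetUpdate r k [v] = pySetAdd r k v := by
  intro r
  induction r with
  | nil => intro k v; rfl
  | cons p t ih =>
    intro k v
    obtain ⟨k', s⟩ := p
    by_cases h : k' = k
    · subst h; simp [pySetUpdate, pySetAdd]
    · rw [pySetUpdate, if_neg h, pySetAdd, if_neg h, ih]

theorem pv_setUpdate_append : ∀ (r : List (Int × PySem.Set String)) (k : Int) (vs : List String) (v : String),
    pySetUpdate r k (vs ++ [v]) = pySetAdd (pySetUpdate r k vs) k v := by
  intro r
  induction r with
  | nil =>
    intro k vs v
    simp [pySetUpdate, pySetAdd, List.foldl_append]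
  | cons p t ih =>
    intro k vs v
    obtain ⟨k', s⟩ := p
    by_cases h : k' = k
    · subst h; simp [pySetUpdate, pySetAdd, List.foldl_append]
    · rw [pySetUpdate, if_neg h, pySetUpdate, if_neg h, pySetAdd, if_neg h, ih]

theorem pv_mem_keys_setUpdate : ∀ (r : List (Int × PySem.Set String)) (k : Int) (vs : List String),
    k ∈ (pySetUpdate r k vs).map Prod.fst := by
  intro r
  induction r with
  | nil => intro k vs; simp [pySetUpdate]
  | cons p t ih =>
    intro k vs
    obtain ⟨k', s⟩ := p
    by_cases h : k' = k
    · subst h; simp [pySetUpdate]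
    · rw [pySetUpdate, if_neg h]
      simpa using Or.inr (ih k vs)

theorem pv_keys_mono_setUpdate : ∀ (r : List (Int × PySem.Set String)) (k' : Int) (ws : List String) (k : Int),
    k ∈ r.map Prod.fst → k ∈ (pySetUpdate r k' ws).map Prod.fst := by
  intro r
  induction r with
  | nil => intro k' ws k h; simp at h
  | cons p t ih =>
    intro k' ws k h
    obtain ⟨a, s⟩ := p
    simp only [List.map_cons, List.mem_cons] at h
    by_cases ha : a = k'
    · subst ha; rw [pySetUpdate, if_pos rfl]
      rcases h with h | h
      · simp [h]
      · simpa using Or.inr h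
    · rw [pySetUpdate, if_neg ha]
      rcases h with h | h
      · simp [h]
      · simpa using Or.inr (ih k' ws k h)

theorem pv_setUpdate_setAdd_comm : ∀ (r : List (Int × PySem.Set String)) (k k' : Int) (v : String) (ws : List String),
    k ≠ k' → k ∈ r.map Prod.fst →
    pySetUpdate (pySetAdd r k v) k' ws = pySetAdd (pySetUpdate r k' ws) k v := by
  intro r
  induction r with
  | nil => intro k k' v ws hne h; simp at h
  | cons p t ih =>
    intro k k' v ws hne h
    obtain ⟨a, s⟩ := p
    simp only [List.map_cons, List.mem_cons] at h
    by_cases hak : a = k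
    · subst hak
      rw [pySetAdd, if_pos rfl, pySetUpdate, if_neg (fun hh => hne hh), pySetUpdate, if_neg (fun hh => hne hh), pySetAdd, if_pos rfl]
    · by_cases hak' : a = k'
      · subst hak'
        rw [pySetAdd, if_neg hak, pySetUpdate, if_pos rfl, pySetUpdate, if_pos rfl, pySetAdd, if_neg hak]
      · rcases h with h | h
        · exact absurd h.symm hak
        · rw [pySetAdd, if_neg hak, pySetUpdate, if_neg hak', pySetUpdate, if_neg hak', pySetAdd, if_neg hak, ih _ _ _ _ hne h]

theorem pv_flush_setAdd_comm : ∀ (t : List (Int × List String)) (r : List (Int × PySem.Set String)) (k : Int) (v : String),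
    k ∉ t.map Prod.fst → k ∈ r.map Prod.fst →
    t.foldl (fun r kv => pySetUpdate r kv.1 kv.2) (pySetAdd r k v)
      = pySetAdd (t.foldl (fun r kv => pySetUpdate r kv.1 kv.2) r) k v := by
  intro t
  induction t with
  | nil => intro r k v _ _; rfl
  | cons p t ih =>
    intro r k v hnt hm
    obtain ⟨k', ws⟩ := p
    simp only [List.map_cons, List.mem_cons] at hnt
    push Not at hnt
    rw [List.foldl_cons, List.foldl_cons]
    rw [pv_setUpdate_setAdd_comm r k k' v ws hnt.1 hm]
    exact ih _ k v hnt.2 (pv_keys_mono_setUpdate r k' ws k hm)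

theorem pv_flush_bucketAdd : ∀ (g : List (Int × List String)) (r : List (Int × PySem.Set String)) (k : Int) (v : String),
    (g.map Prod.fst).Nodup →
    (pyBucketAdd g k v).foldl (fun r kv => pySetUpdate r kv.1 kv.2) r
      = pySetAdd (g.foldl (fun r kv => pySetUpdate r kv.1 kv.2) r) k v := by
  intro g
  induction g with
  | nil =>
    intro r k v _
    simp [pyBucketAdd, pv_setUpdate_singleton]
  | cons p t ih =>
    intro r k v hnd
    obtain ⟨k', vs⟩ := p
    simp only [List.map_cons, List.nodup_cons] at hnd
    by_cases h : k' = k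
    · subst h
      rw [pyBucketAdd, if_pos rfl, List.foldl_cons, List.foldl_cons]
      rw [pv_setUpdate_append]
      exact pv_flush_setAdd_comm t _ k' v hnd.1 (pv_mem_keys_setUpdate r k' vs)
    · rw [pyBucketAdd, if_neg h, List.foldl_cons, List.foldl_cons, ih _ k v hnd.2]

theorem pv_core : ∀ (s : List (Int × String)) (g : List (Int × List String)) (r : List (Int × PySem.Set String)),
    (g.map Prod.fst).Nodup →
    (s.foldl (fun g p => pyBucketAdd g p.1 p.2) g).foldl (fun r kv => pySetUpdate r kv.1 kv.2) r
      = s.foldl (fun r p => pySetAdd r p.1 p.2) (g.foldl (fun r kv => pySetUpdate r kv.1 kv.2) r) := by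
  intro s
  induction s with
  | nil => intro g r _; rfl
  | cons p t ih =>
    intro g r hnd
    rw [List.foldl_cons, List.foldl_cons]
    rw [ih _ r (pv_nodup_pyBucketAdd g p.1 p.2 hnd)]
    rw [pv_flush_bucketAdd g r p.1 p.2 hnd]

theorem pv_restructure_eq (d : List (List Int × List String)) : pvRestructure d = pvDistribute d := by
  cases d <;> simp [pvRestructure, pvDistribute]

theorem pv_foldl_flatMap {α β σ : Type} (f : α → List β) (g : σ → β → σ) :
    ∀ (l : List α) (init : σ),
    (l.flatMap f).foldl g init = l.foldl (fun a x => (f x).foldl g a) init := by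
  intro l
  induction l with
  | nil => intro init; rfl
  | cons x t ih => intro init; rw [List.flatMap_cons, List.foldl_append, ih, List.foldl_cons]

theorem pv_body_eq (i : Int) (r : List (Int × PySem.Set String)) (SL : List (List Int × List String))
    (hnd : (SL.map Prod.fst).Nodup) :
    (pvRestructure (SL.foldl (fun acc kv => pyDictInsert acc (pvRotate i kv.1) kv.2) [])).foldl
        (fun r kv => pySetUpdate r kv.1 kv.2) r
      = SL.foldl (fun result kv =>
          (PySem.List.enumerate kv.2).foldl (fun result iv =>
            pySetAdd result ((PySem.List.pyGet? kv.1 (PySem.Int.mod (i + iv.1) (kv.1.length : Int))).getD 0) iv.2) result) r := by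
  have hni : (SL.map (fun kv => pvRotate i kv.1)).Nodup := by
    have he : SL.map (fun kv => pvRotate i kv.1) = (SL.map Prod.fst).map (pvRotate i) := by
      simp [List.map_map, Function.comp]
    rw [he]
    exact hnd.map (pv_rotate_injective i)
  have hrot : SL.foldl (fun acc kv => pyDictInsert acc (pvRotate i kv.1) kv.2) []
      = SL.map (fun kv => (pvRotate i kv.1, kv.2)) := by
    simpa using pv_foldl_insert_fresh (pvRotate i) (fun v : List String => v) SL [] hni (by simp)
  rw [hrot, pv_restructure_eq, pvDistribute, List.foldl_map]
  simp only [pv_rotGet]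
  have hA : SL.foldl (fun acc kv =>
        (PySem.List.enumerate kv.2).foldl (fun acc iv =>
          pyBucketAdd acc ((PySem.List.pyGet? kv.1 (PySem.Int.mod (i + iv.1) (kv.1.length : Int))).getD 0) iv.2) acc) ([] : List (Int × List String))
      = (SL.flatMap (fun kv => (PySem.List.enumerate kv.2).map (fun iv =>
          (((PySem.List.pyGet? kv.1 (PySem.Int.mod (i + iv.1) (kv.1.length : Int))).getD 0 : Int), iv.2)))).foldl
          (fun g p => pyBucketAdd g p.1 p.2) [] := by
    rw [pv_foldl_flatMap]
    apply List.foldl_ext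
    intro a kv _
    rw [List.foldl_map]
  have hB : SL.foldl (fun result kv =>
        (PySem.List.enumerate kv.2).foldl (fun result iv =>
          pySetAdd result ((PySem.List.pyGet? kv.1 (PySem.Int.mod (i + iv.1) (kv.1.length : Int))).getD 0) iv.2) result) r
      = (SL.flatMap (fun kv => (PySem.List.enumerate kv.2).map (fun iv =>
          (((PySem.List.pyGet? kv.1 (PySem.Int.mod (i + iv.1) (kv.1.length : Int))).getD 0 : Int), iv.2)))).foldl
          (fun s p => pySetAdd s p.1 p.2) r := by
    rw [pv_foldl_flatMap]
    apply List.foldl_ext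
    intro a kv _
    rw [List.foldl_map]
  rw [hA, hB, pv_core _ [] r (by simp)]
  rfl

theorem pv_main (d : List (String × List (List Int))) (k : Int) :
    remove_param_redundancy d k = remove_param_redundancy_alt d k := by
  simp only [remove_param_redundancy, remove_param_redundancy_alt]
  have hnodupC : ((pvCollectSettingsByRank (pyDictOf d)).map Prod.fst).Nodup := by
    rw [pvCollectSettingsByRank]
    refine pv_foldl_invariant (fun st : List (List Int × List (String × Int)) => (st.map Prod.fst).Nodup) _ _ _ (by simp) ?_
    intro s x hs
    exact pv_foldl_invariant (fun st : List (List Int × List (String × Int)) => (st.map Prod.fst).Nodup) _ _ _ hs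
      (fun s' y hs' => pv_nodup_pyBucketAdd _ _ _ hs')
  have hSL : (pvCollectSettingsByRank (pyDictOf d)).foldl
        (fun acc kv => pyDictInsert acc kv.1 (kv.2.map (·.1))) []
      = (pvCollectSettingsByRank (pyDictOf d)).map (fun kv => (kv.1, kv.2.map Prod.fst)) := by
    simpa using pv_foldl_insert_fresh (fun x : List Int => x)
      (fun vs : List (String × Int) => vs.map Prod.fst)
      (pvCollectSettingsByRank (pyDictOf d)) [] hnodupC (by simp)
  have hBL : (pyDictOf d).foldl
        (fun acc kv => kv.2.foldl (fun acc layout => pyBucketAdd acc layout kv.1) acc) []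
      = (pvCollectSettingsByRank (pyDictOf d)).map (fun kv => (kv.1, kv.2.map Prod.fst)) := by
    have h := pv_collect_eq_group (pyDictOf d) []
    simp only [List.map_nil] at h
    rw [← h]
    rfl
  rw [hSL, hBL]
  apply List.foldl_ext
  intro r i _
  have hndSL : (((pvCollectSettingsByRank (pyDictOf d)).map (fun kv => (kv.1, kv.2.map Prod.fst))).map Prod.fst).Nodup := by
    rw [List.map_map]
    simpa [Function.comp] using hnodupC
  exact pv_body_eq i r _ hndSL

-- ===== VERDICT (by name: the statement is the Claim_ definition above) =====
theorem remove_param_redundancy_spec : Claim_equal_remove_param_redundancy := by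
  intro d k _ _
  unfold Spec_remove_param_redundancy
  exact pv_main d k
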